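-- pv_equiv track=rewrite | github.com/kshivam26/depfast-ae | analyze_wait.py | bucketize_latencies
-- ===== SOURCE A (Python) =====
-- def bucketize_latencies(latencies):
--     bucket_ranges = {
--         "<10000": (0, 10000),
--         "10000-20000": (10000, 20000),
--         "20000-30000": (20000, 30000),
--         "30000-40000": (30000, 40000),
--         "40000-50000": (40000, 50000),
--         "50000-60000": (50000, 60000),
--         "60000-70000": (60000, 70000),
--         "70000-80000": (70000, 80000),
--         "80000-90000": (80000, 90000),
--         "90000-100000": (90000, 100000),
--         ">100000": (100000, float('inf'))
--     }
--
--
--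
--
--     bucket_counts = {bucket: 0 for bucket in bucket_ranges}
--
--     for latency in latencies:
--         for bucket, (lower, upper) in bucket_ranges.items():
--             if lower <= latency < upper:
--                 bucket_counts[bucket] += 1
--                 break
--
--     return bucket_counts
-- ===== SOURCE B (Python) =====
-- LABELS = ["<10000", "10000-20000", "20000-30000", "30000-40000", "40000-50000",
--           "50000-60000", "60000-70000", "70000-80000", "80000-90000",
--           "90000-100000", ">100000"]
--
-- def bucketize_latencies(latencies):
--     counts = {label: 0 for label in LABELS}
--     for latency in latencies:
--         if latency >= 0:
--             counts[LABELS[min(latency // 10000, 10)]] += 1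
--     return counts
-- ===== Notes on version B (the rewrite author's own statement) =====
-- stated objective: faster
-- what changed: Replaces the inner linear scan over the 11 bucket ranges by direct arithmetic bucket indexing min(latency // 10000, 10) into an ordered label list, with a single nonnegativity guard reproducing A's silent skip of negative latencies.
import Mathlib
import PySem

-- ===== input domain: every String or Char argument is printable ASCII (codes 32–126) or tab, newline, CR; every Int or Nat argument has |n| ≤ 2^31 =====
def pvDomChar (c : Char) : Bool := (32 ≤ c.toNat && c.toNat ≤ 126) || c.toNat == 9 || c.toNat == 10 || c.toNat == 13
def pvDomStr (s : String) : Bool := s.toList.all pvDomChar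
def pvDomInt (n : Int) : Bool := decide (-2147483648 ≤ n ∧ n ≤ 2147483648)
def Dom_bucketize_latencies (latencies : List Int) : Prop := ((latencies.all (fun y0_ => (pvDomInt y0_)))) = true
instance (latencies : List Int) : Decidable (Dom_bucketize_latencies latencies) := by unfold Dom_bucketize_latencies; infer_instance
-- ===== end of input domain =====

-- B replaces A's inner scan over the 11 bucket ranges by direct arithmetic bucket
-- indexing min(latency // 10000, 10) into an ordered label list; same return value.

-- ===== PORT A =====
-- Upper bound of a bucket: `some u` for a finite bound, `none` for float('inf').
-- The only use of that float in A is the comparison `latency < upper`, which for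
-- upper = inf is true for every int; pvLtUpper transcribes exactly that.
def pvLtUpper (l : Int) : Option Int → Bool
  | some u => decide (l < u)
  | none => true

def pvRanges : List (String × Int × Option Int) :=
  [("<10000", 0, some 10000), ("10000-20000", 10000, some 20000),
   ("20000-30000", 20000, some 30000), ("30000-40000", 30000, some 40000),
   ("40000-50000", 40000, some 50000), ("50000-60000", 50000, some 60000),
   ("60000-70000", 60000, some 70000), ("70000-80000", 70000, some 80000),
   ("80000-90000", 80000, some 90000), ("90000-100000", 90000, some 100000),
   (">100000", 100000, none)]

-- the inner `for bucket, (lower, upper) in bucket_ranges.items(): … break`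
def pvInnerA (l : Int) : List (String × Int × Option Int) → PySem.Dict String Int → PySem.Dict String Int
  | [], d => d
  | (b, lo, hi) :: rest, d =>
    if lo ≤ l ∧ pvLtUpper l hi = true then
      d.modify b 0 (· + 1)            -- bucket_counts[bucket] += 1 (key always present)
    else pvInnerA l rest d            -- no break: continue the scan

def bucketize_latencies (latencies : List Int) : List (String × Int) :=
  let init := pvRanges.foldl (fun d p => d.insert p.1 0) PySem.Dict.empty   -- {bucket: 0 for bucket in bucket_ranges}
  (latencies.foldl (fun d l => pvInnerA l pvRanges d) init).items

-- ===== PORT B =====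
def pvLabels : List String :=
  ["<10000", "10000-20000", "20000-30000", "30000-40000", "40000-50000",
   "50000-60000", "60000-70000", "70000-80000", "80000-90000",
   "90000-100000", ">100000"]

def pvStepB (d : PySem.Dict String Int) (l : Int) : PySem.Dict String Int :=
  if l ≥ 0 then
    -- LABELS[min(latency // 10000, 10)]: the index is always in [0,10], so the
    -- total pyGetD (default never used) is Python's LABELS[idx] here
    d.modify (PySem.List.pyGetD pvLabels (min (PySem.Int.floordiv l 10000) 10) "") 0 (· + 1)
  else d

def bucketize_latencies_alt (latencies : List Int) : List (String × Int) :=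
  let counts := pvLabels.foldl (fun d b => d.insert b 0) PySem.Dict.empty   -- {label: 0 for label in LABELS}
  (latencies.foldl pvStepB counts).items

-- ===== PRECONDITION & SPEC =====
def Spec_bucketize_latencies (latencies : List Int) (out : List (String × Int)) : Prop := out = bucketize_latencies_alt latencies
instance (latencies : List Int) (out : List (String × Int)) : Decidable (Spec_bucketize_latencies latencies out) := by unfold Spec_bucketize_latencies; infer_instance

-- ===== CLAIM (what is proved, stated in full; the proofs are below) =====
def Claim_equal_bucketize_latencies : Prop := ∀ (latencies : List Int), Dom_bucketize_latencies latencies → Spec_bucketize_latencies latencies (bucketize_latencies latencies)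

-- ===== LEMMAS AND PROOFS =====

lemma pv_floordiv_val (l k : Int) (h1 : k * 10000 ≤ l) (h2 : l < (k + 1) * 10000) :
    PySem.Int.floordiv l 10000 = k :=
  (PySem.Int.floordiv_eq_iff_of_pos (by norm_num)).2 ⟨h1, h2⟩
lemma pvInnerA_cons (l : Int) (b : String) (lo : Int) (hi : Option Int)
    (rest : List (String × Int × Option Int)) (d : PySem.Dict String Int) :
    pvInnerA l ((b, lo, hi) :: rest) d
      = if lo ≤ l ∧ pvLtUpper l hi = true then d.modify b 0 (· + 1)
        else pvInnerA l rest d := rfl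

lemma pv_step_eq (d : PySem.Dict String Int) (l : Int) :
    pvInnerA l pvRanges d = pvStepB d l := by
  by_cases h0 : l ≥ 0
  case pos =>
    by_cases c1 : l < 10000
    · have hq : PySem.Int.floordiv l 10000 = 0 := pv_floordiv_val l 0 (by omega) (by omega)
      simp only [pvRanges, pvStepB, hq, if_pos h0]
      rw [pvInnerA_cons, if_pos ⟨by omega, by simp only [pvLtUpper, decide_eq_true_eq]; omega⟩]
      congr 1
    by_cases c2 : l < 20000
    · have hq : PySem.Int.floordiv l 10000 = 1 := pv_floordiv_val l 1 (by omega) (by omega)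
      simp only [pvRanges, pvStepB, hq, if_pos h0]
      rw [pvInnerA_cons, if_neg (by simp only [pvLtUpper, decide_eq_true_eq]; omega)]
      rw [pvInnerA_cons, if_pos ⟨by omega, by simp only [pvLtUpper, decide_eq_true_eq]; omega⟩]
      congr 1
    by_cases c3 : l < 30000
    · have hq : PySem.Int.floordiv l 10000 = 2 := pv_floordiv_val l 2 (by omega) (by omega)
      simp only [pvRanges, pvStepB, hq, if_pos h0]
      rw [pvInnerA_cons, if_neg (by simp only [pvLtUpper, decide_eq_true_eq]; omega)]
      rw [pvInnerA_cons, if_neg (by simp only [pvLtUpper, decide_eq_true_eq]; omega)]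
      rw [pvInnerA_cons, if_pos ⟨by omega, by simp only [pvLtUpper, decide_eq_true_eq]; omega⟩]
      congr 1
    by_cases c4 : l < 40000
    · have hq : PySem.Int.floordiv l 10000 = 3 := pv_floordiv_val l 3 (by omega) (by omega)
      simp only [pvRanges, pvStepB, hq, if_pos h0]
      rw [pvInnerA_cons, if_neg (by simp only [pvLtUpper, decide_eq_true_eq]; omega)]
      rw [pvInnerA_cons, if_neg (by simp only [pvLtUpper, decide_eq_true_eq]; omega)]
      rw [pvInnerA_cons, if_neg (by simp only [pvLtUpper, decide_eq_true_eq]; omega)]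
      rw [pvInnerA_cons, if_pos ⟨by omega, by simp only [pvLtUpper, decide_eq_true_eq]; omega⟩]
      congr 1
    by_cases c5 : l < 50000
    · have hq : PySem.Int.floordiv l 10000 = 4 := pv_floordiv_val l 4 (by omega) (by omega)
      simp only [pvRanges, pvStepB, hq, if_pos h0]
      rw [pvInnerA_cons, if_neg (by simp only [pvLtUpper, decide_eq_true_eq]; omega)]
      rw [pvInnerA_cons, if_neg (by simp only [pvLtUpper, decide_eq_true_eq]; omega)]
      rw [pvInnerA_cons, if_neg (by simp only [pvLtUpper, decide_eq_true_eq]; omega)]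
      rw [pvInnerA_cons, if_neg (by simp only [pvLtUpper, decide_eq_true_eq]; omega)]
      rw [pvInnerA_cons, if_pos ⟨by omega, by simp only [pvLtUpper, decide_eq_true_eq]; omega⟩]
      congr 1
    by_cases c6 : l < 60000
    · have hq : PySem.Int.floordiv l 10000 = 5 := pv_floordiv_val l 5 (by omega) (by omega)
      simp only [pvRanges, pvStepB, hq, if_pos h0]
      rw [pvInnerA_cons, if_neg (by simp only [pvLtUpper, decide_eq_true_eq]; omega)]
      rw [pvInnerA_cons, if_neg (by simp only [pvLtUpper, decide_eq_true_eq]; omega)]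
      rw [pvInnerA_cons, if_neg (by simp only [pvLtUpper, decide_eq_true_eq]; omega)]
      rw [pvInnerA_cons, if_neg (by simp only [pvLtUpper, decide_eq_true_eq]; omega)]
      rw [pvInnerA_cons, if_neg (by simp only [pvLtUpper, decide_eq_true_eq]; omega)]
      rw [pvInnerA_cons, if_pos ⟨by omega, by simp only [pvLtUpper, decide_eq_true_eq]; omega⟩]
      congr 1
    by_cases c7 : l < 70000
    · have hq : PySem.Int.floordiv l 10000 = 6 := pv_floordiv_val l 6 (by omega) (by omega)
      simp only [pvRanges, pvStepB, hq, if_pos h0]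
      rw [pvInnerA_cons, if_neg (by simp only [pvLtUpper, decide_eq_true_eq]; omega)]
      rw [pvInnerA_cons, if_neg (by simp only [pvLtUpper, decide_eq_true_eq]; omega)]
      rw [pvInnerA_cons, if_neg (by simp only [pvLtUpper, decide_eq_true_eq]; omega)]
      rw [pvInnerA_cons, if_neg (by simp only [pvLtUpper, decide_eq_true_eq]; omega)]
      rw [pvInnerA_cons, if_neg (by simp only [pvLtUpper, decide_eq_true_eq]; omega)]
      rw [pvInnerA_cons, if_neg (by simp only [pvLtUpper, decide_eq_true_eq]; omega)]
      rw [pvInnerA_cons, if_pos ⟨by omega, by simp only [pvLtUpper, decide_eq_true_eq]; omega⟩]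
      congr 1
    by_cases c8 : l < 80000
    · have hq : PySem.Int.floordiv l 10000 = 7 := pv_floordiv_val l 7 (by omega) (by omega)
      simp only [pvRanges, pvStepB, hq, if_pos h0]
      rw [pvInnerA_cons, if_neg (by simp only [pvLtUpper, decide_eq_true_eq]; omega)]
      rw [pvInnerA_cons, if_neg (by simp only [pvLtUpper, decide_eq_true_eq]; omega)]
      rw [pvInnerA_cons, if_neg (by simp only [pvLtUpper, decide_eq_true_eq]; omega)]
      rw [pvInnerA_cons, if_neg (by simp only [pvLtUpper, decide_eq_true_eq]; omega)]
      rw [pvInnerA_cons, if_neg (by simp only [pvLtUpper, decide_eq_true_eq]; omega)]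
      rw [pvInnerA_cons, if_neg (by simp only [pvLtUpper, decide_eq_true_eq]; omega)]
      rw [pvInnerA_cons, if_neg (by simp only [pvLtUpper, decide_eq_true_eq]; omega)]
      rw [pvInnerA_cons, if_pos ⟨by omega, by simp only [pvLtUpper, decide_eq_true_eq]; omega⟩]
      congr 1
    by_cases c9 : l < 90000
    · have hq : PySem.Int.floordiv l 10000 = 8 := pv_floordiv_val l 8 (by omega) (by omega)
      simp only [pvRanges, pvStepB, hq, if_pos h0]
      rw [pvInnerA_cons, if_neg (by simp only [pvLtUpper, decide_eq_true_eq]; omega)]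
      rw [pvInnerA_cons, if_neg (by simp only [pvLtUpper, decide_eq_true_eq]; omega)]
      rw [pvInnerA_cons, if_neg (by simp only [pvLtUpper, decide_eq_true_eq]; omega)]
      rw [pvInnerA_cons, if_neg (by simp only [pvLtUpper, decide_eq_true_eq]; omega)]
      rw [pvInnerA_cons, if_neg (by simp only [pvLtUpper, decide_eq_true_eq]; omega)]
      rw [pvInnerA_cons, if_neg (by simp only [pvLtUpper, decide_eq_true_eq]; omega)]
      rw [pvInnerA_cons, if_neg (by simp only [pvLtUpper, decide_eq_true_eq]; omega)]
      rw [pvInnerA_cons, if_neg (by simp only [pvLtUpper, decide_eq_true_eq]; omega)]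
      rw [pvInnerA_cons, if_pos ⟨by omega, by simp only [pvLtUpper, decide_eq_true_eq]; omega⟩]
      congr 1
    by_cases c10 : l < 100000
    · have hq : PySem.Int.floordiv l 10000 = 9 := pv_floordiv_val l 9 (by omega) (by omega)
      simp only [pvRanges, pvStepB, hq, if_pos h0]
      rw [pvInnerA_cons, if_neg (by simp only [pvLtUpper, decide_eq_true_eq]; omega)]
      rw [pvInnerA_cons, if_neg (by simp only [pvLtUpper, decide_eq_true_eq]; omega)]
      rw [pvInnerA_cons, if_neg (by simp only [pvLtUpper, decide_eq_true_eq]; omega)]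
      rw [pvInnerA_cons, if_neg (by simp only [pvLtUpper, decide_eq_true_eq]; omega)]
      rw [pvInnerA_cons, if_neg (by simp only [pvLtUpper, decide_eq_true_eq]; omega)]
      rw [pvInnerA_cons, if_neg (by simp only [pvLtUpper, decide_eq_true_eq]; omega)]
      rw [pvInnerA_cons, if_neg (by simp only [pvLtUpper, decide_eq_true_eq]; omega)]
      rw [pvInnerA_cons, if_neg (by simp only [pvLtUpper, decide_eq_true_eq]; omega)]
      rw [pvInnerA_cons, if_neg (by simp only [pvLtUpper, decide_eq_true_eq]; omega)]
      rw [pvInnerA_cons, if_pos ⟨by omega, by simp only [pvLtUpper, decide_eq_true_eq]; omega⟩]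
      congr 1
    · have hq : min (PySem.Int.floordiv l 10000) 10 = 10 := by
        have h10 : (10:Int) ≤ PySem.Int.floordiv l 10000 :=
          (PySem.Int.le_floordiv_iff_mul_le (by norm_num)).2 (by omega)
        omega
      simp only [pvRanges, pvStepB, hq, if_pos h0]
      rw [pvInnerA_cons, if_neg (by simp only [pvLtUpper, decide_eq_true_eq]; omega)]
      rw [pvInnerA_cons, if_neg (by simp only [pvLtUpper, decide_eq_true_eq]; omega)]
      rw [pvInnerA_cons, if_neg (by simp only [pvLtUpper, decide_eq_true_eq]; omega)]
      rw [pvInnerA_cons, if_neg (by simp only [pvLtUpper, decide_eq_true_eq]; omega)]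
      rw [pvInnerA_cons, if_neg (by simp only [pvLtUpper, decide_eq_true_eq]; omega)]
      rw [pvInnerA_cons, if_neg (by simp only [pvLtUpper, decide_eq_true_eq]; omega)]
      rw [pvInnerA_cons, if_neg (by simp only [pvLtUpper, decide_eq_true_eq]; omega)]
      rw [pvInnerA_cons, if_neg (by simp only [pvLtUpper, decide_eq_true_eq]; omega)]
      rw [pvInnerA_cons, if_neg (by simp only [pvLtUpper, decide_eq_true_eq]; omega)]
      rw [pvInnerA_cons, if_neg (by simp only [pvLtUpper, decide_eq_true_eq]; omega)]
      rw [pvInnerA_cons, if_pos ⟨by omega, rfl⟩]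
      congr 1
  case neg =>
    simp only [pvRanges, pvStepB, if_neg h0]
    rw [pvInnerA_cons, if_neg (by simp only [pvLtUpper, decide_eq_true_eq]; omega)]
    rw [pvInnerA_cons, if_neg (by simp only [pvLtUpper, decide_eq_true_eq]; omega)]
    rw [pvInnerA_cons, if_neg (by simp only [pvLtUpper, decide_eq_true_eq]; omega)]
    rw [pvInnerA_cons, if_neg (by simp only [pvLtUpper, decide_eq_true_eq]; omega)]
    rw [pvInnerA_cons, if_neg (by simp only [pvLtUpper, decide_eq_true_eq]; omega)]
    rw [pvInnerA_cons, if_neg (by simp only [pvLtUpper, decide_eq_true_eq]; omega)]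
    rw [pvInnerA_cons, if_neg (by simp only [pvLtUpper, decide_eq_true_eq]; omega)]
    rw [pvInnerA_cons, if_neg (by simp only [pvLtUpper, decide_eq_true_eq]; omega)]
    rw [pvInnerA_cons, if_neg (by simp only [pvLtUpper, decide_eq_true_eq]; omega)]
    rw [pvInnerA_cons, if_neg (by simp only [pvLtUpper, decide_eq_true_eq]; omega)]
    rw [pvInnerA_cons, if_neg (by simp only [pvLtUpper, and_true]; omega)]
    rfl
theorem pv_folds_eq (latencies : List Int) :
    latencies.foldl (fun d l => pvInnerA l pvRanges d)
        (pvRanges.foldl (fun d p => d.insert p.1 0) PySem.Dict.empty)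
      = latencies.foldl pvStepB (pvLabels.foldl (fun d b => d.insert b 0) PySem.Dict.empty) := by
  have hf : (fun d l => pvInnerA l pvRanges d) = pvStepB :=
    funext fun d => funext fun l => pv_step_eq d l
  rw [hf]
  rfl

-- ===== VERDICT (by name: the statement is the Claim_ definition above) =====
theorem bucketize_latencies_spec : Claim_equal_bucketize_latencies := by
  intro latencies _
  unfold Spec_bucketize_latencies bucketize_latencies bucketize_latencies_alt
  exact congrArg PySem.Dict.items (pv_folds_eq latencies)
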